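-- pv_equiv track=rewrite | github.com/HyunKyungHan/codetree-TILs | 240531/스승의 은혜/the-grace-form-teacher.py | discount
-- ===== SOURCE A (Python) =====
-- import copy
--
-- def count_affordable(mat, budget):
--     cost = 0
--     st_count = 0
--     for i in range(len(mat)):
--         cost += sum(mat[i])
--         if budget >= cost:
--             st_count += 1
--     return st_count
--
-- def discount(mat, budget):
--     max_std = 0
--     for i in range(len(mat)):
--         d_mat = copy.deepcopy(mat)
--         d_mat[i][0] = d_mat[i][0]//2
--         if count_affordable(d_mat, budget) > max_std:
--             max_std = count_affordable(d_mat, budget)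
--     return max_std
-- ===== SOURCE B (Python) =====
-- def discount(mat, budget):
--     # prefix sums of row costs, computed once
--     prefix = []
--     total = 0
--     for row in mat:
--         total += sum(row)
--         prefix.append(total)
--     best = 0
--     for i, row in enumerate(mat):
--         delta = row[0] - row[0] // 2
--         cnt = 0
--         for j, p in enumerate(prefix):
--             adj = p - delta if j >= i else p
--             if adj <= budget:
--                 cnt += 1
--         if cnt > best:
--             best = cnt
--     return best
-- ===== Notes on version B (the rewrite author's own statement) =====
-- stated objective: faster
-- what changed: B computes the row-cost prefix sums once and, for each candidate row, counts affordable students by subtracting one delta from the suffix prefixes, removing A's per-row deepcopy and full re-summation (and A's duplicated count call).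
import Mathlib
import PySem

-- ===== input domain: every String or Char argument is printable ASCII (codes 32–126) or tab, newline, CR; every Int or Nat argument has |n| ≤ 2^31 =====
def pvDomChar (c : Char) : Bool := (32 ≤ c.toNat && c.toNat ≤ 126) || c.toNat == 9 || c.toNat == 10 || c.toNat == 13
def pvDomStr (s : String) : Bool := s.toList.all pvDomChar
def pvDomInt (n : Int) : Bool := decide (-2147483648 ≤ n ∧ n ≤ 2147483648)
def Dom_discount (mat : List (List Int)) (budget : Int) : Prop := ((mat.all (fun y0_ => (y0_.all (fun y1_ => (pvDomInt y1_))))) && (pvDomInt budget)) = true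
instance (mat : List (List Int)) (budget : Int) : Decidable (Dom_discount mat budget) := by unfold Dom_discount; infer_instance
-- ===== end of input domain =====

-- B replaces A's per-row deepcopy + full re-summation by one prefix-sum pass and a per-row
-- delta adjustment (objective: faster).

-- ===== PORT A =====
-- A's helper count_affordable: cumulative cost over rows, counting rows still within budget
def count_affordable (mat : List (List Int)) (budget : Int) : Int :=
  (mat.foldl (fun (st : Int × Int) row =>
      let cost := st.1 + row.foldl (· + ·) 0
      (cost, if budget ≥ cost then st.2 + 1 else st.2)) ((0 : Int), (0 : Int))).2

-- d_mat[i][0] = d_mat[i][0] // 2 ; Python raises IndexError on an empty row (excluded by Pre_)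
def halveFirst (row : List Int) : List Int :=
  match row with
  | [] => []
  | x :: xs => PySem.Int.floordiv x 2 :: xs

-- the list assignment d_mat[i][0] = … on the (deep)copy of mat
def setRow : List (List Int) → Nat → List (List Int)
  | [], _ => []
  | r :: rs, 0 => halveFirst r :: rs
  | r :: rs, n + 1 => r :: setRow rs n

def discount (mat : List (List Int)) (budget : Int) : Int :=
  (List.range mat.length).foldl (fun max_std i =>
    let d_mat := setRow mat i
    let c := count_affordable d_mat budget
    if c > max_std then c else max_std) 0

-- ===== PORT B =====
-- prefix sums of the row costs, computed once
def bPrefix (mat : List (List Int)) : List Int :=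
  (mat.foldl (fun (st : Int × List Int) row =>
      let t := st.1 + row.foldl (· + ·) 0
      (t, st.2 ++ [t])) ((0 : Int), ([] : List Int))).2

-- the inner 'for j, p in enumerate(prefix)' counting loop
def bCountAux (budget delta : Int) (i : Nat) : Nat → List Int → Int → Int
  | _, [], cnt => cnt
  | j, p :: ps, cnt =>
      let adj := if j ≥ i then p - delta else p
      bCountAux budget delta i (j + 1) ps (if adj ≤ budget then cnt + 1 else cnt)

def discount_alt (mat : List (List Int)) (budget : Int) : Int :=
  let pfx := bPrefix mat
  mat.zipIdx.foldl (fun best ri =>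
      let h := ri.1.headD 0   -- row[0]; Python raises on an empty row (excluded by Pre_)
      let delta := h - PySem.Int.floordiv h 2
      let cnt := bCountAux budget delta ri.2 0 pfx 0
      if cnt > best then cnt else best) 0

-- ===== PRECONDITION & SPEC =====
-- Pre_ excludes matrices containing an empty row: there both Pythons raise IndexError on row[0].
def Pre_discount (mat : List (List Int)) (budget : Int) : Prop :=
  ∀ row ∈ mat, row ≠ []
instance (mat : List (List Int)) (budget : Int) : Decidable (Pre_discount mat budget) := by
  unfold Pre_discount; infer_instance

def pvWitness_discount : List (List Int) × Int := ([[4, 2], [3]], 5)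

def Spec_discount (mat : List (List Int)) (budget : Int) (out : Int) : Prop := out = discount_alt mat budget
instance (mat : List (List Int)) (budget : Int) (out : Int) : Decidable (Spec_discount mat budget out) := by unfold Spec_discount; infer_instance

-- ===== CLAIM (what is proved, stated in full; the proofs are below) =====
def Claim_equal_discount : Prop := ∀ (mat : List (List Int)) (budget : Int), Dom_discount mat budget → Pre_discount mat budget → Spec_discount mat budget (discount mat budget)

-- ===== LEMMAS AND PROOFS =====

def pvRowSum (r : List Int) : Int := r.foldl (· + ·) 0

def pvPref : List (List Int) → Int → List Int
  | [], _ => []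
  | r :: rs, c => (c + pvRowSum r) :: pvPref rs (c + pvRowSum r)

def pvCnt (budget : Int) : List Int → Int
  | [] => 0
  | p :: ps => (if budget ≥ p then 1 else 0) + pvCnt budget ps

def pvAdjust (d : Int) : Nat → List Int → List Int
  | 0, ps => ps.map (· - d)
  | _ + 1, [] => []
  | n + 1, p :: ps => p :: pvAdjust d n ps

theorem pvAdjust_nil (d : Int) (n : Nat) : pvAdjust d n [] = [] := by
  cases n <;> simp [pvAdjust]

theorem foldl_add_shift (t : List Int) (a : Int) :
    t.foldl (· + ·) a = a + t.foldl (· + ·) 0 := by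
  induction t generalizing a with
  | nil => simp
  | cons h t ih =>
      simp only [List.foldl]
      rw [ih (a + h), ih (0 + h)]; ring

theorem count_fold_eq (budget : Int) (mat : List (List Int)) (c k : Int) :
    (mat.foldl (fun (st : Int × Int) row =>
        let cost := st.1 + row.foldl (· + ·) 0
        (cost, if budget ≥ cost then st.2 + 1 else st.2)) (c, k)).2
      = k + pvCnt budget (pvPref mat c) := by
  induction mat generalizing c k with
  | nil => simp [pvPref, pvCnt]
  | cons r rs ih =>
      simp only [List.foldl, pvPref, pvCnt]
      rw [ih]
      show (if budget ≥ c + pvRowSum r then k + 1 else k) + _ = _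
      split_ifs <;> simp only [pvRowSum] <;> ring

theorem count_affordable_eq (mat : List (List Int)) (budget : Int) :
    count_affordable mat budget = pvCnt budget (pvPref mat 0) := by
  unfold count_affordable
  rw [count_fold_eq]; ring

theorem bPrefix_fold (mat : List (List Int)) (t : Int) (acc : List Int) :
    (mat.foldl (fun (st : Int × List Int) row =>
        let x := st.1 + row.foldl (· + ·) 0
        (x, st.2 ++ [x])) (t, acc)).2 = acc ++ pvPref mat t := by
  induction mat generalizing t acc with
  | nil => simp [pvPref]
  | cons r rs ih =>
      simp only [List.foldl, pvPref]
      rw [ih]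
      simp [pvRowSum]

theorem bPrefix_eq (mat : List (List Int)) : bPrefix mat = pvPref mat 0 := by
  unfold bPrefix
  rw [bPrefix_fold]; simp

theorem pvPref_sub (mat : List (List Int)) (c d : Int) :
    pvPref mat (c - d) = (pvPref mat c).map (· - d) := by
  induction mat generalizing c with
  | nil => simp [pvPref]
  | cons r rs ih =>
      simp only [pvPref, List.map]
      have h : c - d + pvRowSum r = (c + pvRowSum r) - d := by ring
      rw [h, ih]

theorem pvRowSum_halveFirst (h : Int) (t : List Int) :
    pvRowSum (halveFirst (h :: t)) = pvRowSum (h :: t) - (h - PySem.Int.floordiv h 2) := by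
  simp only [halveFirst, pvRowSum, List.foldl]
  rw [foldl_add_shift t (0 + PySem.Int.floordiv h 2), foldl_add_shift t (0 + h)]
  ring

theorem pvPref_setRow (mat : List (List Int)) (i : Nat) (c : Int) (h0 : Int) (t0 : List Int)
    (hget : mat[i]? = some (h0 :: t0)) :
    pvPref (setRow mat i) c
      = pvAdjust (h0 - PySem.Int.floordiv h0 2) i (pvPref mat c) := by
  induction mat generalizing i c with
  | nil => simp at hget
  | cons r rs ih =>
      cases i with
      | zero =>
          simp only [List.getElem?_cons_zero, Option.some.injEq] at hget
          subst hget
          simp only [setRow, pvPref, pvAdjust, List.map]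
          rw [pvRowSum_halveFirst]
          have h : c + (pvRowSum (h0 :: t0) - (h0 - PySem.Int.floordiv h0 2))
              = (c + pvRowSum (h0 :: t0)) - (h0 - PySem.Int.floordiv h0 2) := by ring
          rw [h, pvPref_sub]
      | succ n =>
          simp only [List.getElem?_cons_succ] at hget
          simp only [setRow, pvPref, pvAdjust]
          rw [ih _ _ hget]

theorem bCountAux_eq (budget delta : Int) (i : Nat) (ps : List Int) (j : Nat) (cnt : Int) :
    bCountAux budget delta i j ps cnt = cnt + pvCnt budget (pvAdjust delta (i - j) ps) := by
  induction ps generalizing j cnt with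
  | nil => simp [bCountAux, pvAdjust_nil, pvCnt]
  | cons p ps ih =>
      simp only [bCountAux]
      rw [ih]
      by_cases hij : i ≤ j
      · have h1 : i - j = 0 := by omega
        have h2 : i - (j + 1) = 0 := by omega
        rw [h1, h2]
        simp only [pvAdjust, List.map, pvCnt]
        simp only [if_pos (hij : i ≤ j)]
        split_ifs <;> omega
      · obtain ⟨k, hk⟩ : ∃ k, i - j = k + 1 := ⟨i - j - 1, by omega⟩
        have h2 : i - (j + 1) = k := by omega
        rw [hk, h2]
        simp only [pvAdjust, pvCnt]
        simp only [if_neg (by omega : ¬ j ≥ i)]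
        split_ifs <;> omega

theorem zipIdx_eq_map_range (mat : List (List Int)) :
    mat.zipIdx = (List.range mat.length).map (fun i => (mat.getD i [], i)) := by
  apply List.ext_getElem
  · simp
  · intro i h1 h2
    have hi : i < mat.length := by simpa using h1
    simp [List.getElem_zipIdx, List.getD, List.getElem?_eq_getElem hi]

theorem per_index_eq (mat : List (List Int)) (budget : Int) (i : Nat)
    (hi : i < mat.length) (hPre : Pre_discount mat budget) :
    count_affordable (setRow mat i) budget
      = bCountAux budget
          ((mat.getD i []).headD 0 - PySem.Int.floordiv ((mat.getD i []).headD 0) 2)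
          i 0 (bPrefix mat) 0 := by
  have hget : mat[i]? = some mat[i] := List.getElem?_eq_getElem hi
  have hmem : mat[i] ∈ mat := List.getElem_mem hi
  have hne : mat[i] ≠ [] := hPre _ hmem
  obtain ⟨h0, t0, hrow⟩ : ∃ h0 t0, mat[i] = h0 :: t0 := by
    cases hr : mat[i] with
    | nil => exact absurd hr hne
    | cons a b => exact ⟨a, b, rfl⟩
  have hgetD : mat.getD i [] = h0 :: t0 := by
    simp [List.getD, hget, hrow]
  rw [count_affordable_eq, bCountAux_eq, bPrefix_eq, hgetD,
      pvPref_setRow mat i 0 h0 t0 (by rw [hget, hrow])]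
  simp

-- ===== VERDICT (by name: the statement is the Claim_ definition above) =====
theorem discount_spec : Claim_equal_discount := by
  intro mat budget _hDom hPre
  unfold Spec_discount discount discount_alt
  rw [zipIdx_eq_map_range, List.foldl_map]
  apply PySem.List.foldl_congr_mem
  intro b x hx
  have hi : x < mat.length := by simpa using List.mem_range.mp hx
  simp only []
  rw [per_index_eq mat budget x hi hPre]
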